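-- pv_equiv track=rewrite | github.com/YogeshR1/DAA_Solutions | cloudy_day.py | maximumPeople
-- ===== SOURCE A (Python) =====
-- def maximumPeople(p, x, y, r):
--     events = {}
--     n = len(p)
--     m = len(y)
--
--     for i in range(n):
--         if x[i] in events:
--             events[x[i]].append((2, p[i]))
--         else:
--             events[x[i]] = [(2, p[i])]
--
--     for i in range(m):
--         if y[i] - r[i] in events:
--             events[y[i] - r[i]].append((1, i + 1))
--         else:
--             events[y[i] - r[i]] = [(1, i + 1)]
--
--         if y[i] + r[i] + 1 in events:
--             events[y[i] + r[i] + 1].append((-1, i + 1))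
--         else:
--             events[y[i] + r[i] + 1] = [(-1, i + 1)]
--
--     not_under_attack = 0
--     active = set()
--     bomber_pop = [0] * (m + 1)
--
--
--     for cord in sorted(events.keys()):
--         v = events[cord]
--         v.sort()
--
--         for event in v:
--             if event[0] == -1:
--                 active.discard(event[1])
--             elif event[0] == 1:
--                 active.add(event[1])
--             else:
--                 if len(active) == 1:
--                     bomber_pop[list(active)[0]] += event[1]
--                 elif len(active) == 0:
--                     not_under_attack += event[1]
--
--     mx = max(bomber_pop)
--     return not_under_attack + mx
-- ===== SOURCE B (Python) =====
-- def maximumPeople(p, x, y, r):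
--     # For each person, count the clouds whose interval [y-r, y+r] contains them;
--     # people under no cloud are always safe, people under exactly one cloud are
--     # saved by removing that cloud.
--     best = [0] * (len(y) + 1)
--     free = 0
--     for pi, xi in zip(p, x):
--         cnt = 0
--         idx = 0
--         for j, (yj, rj) in enumerate(zip(y, r)):
--             if yj - rj <= xi <= yj + rj:
--                 cnt += 1
--                 idx = j + 1
--         if cnt == 0:
--             free += pi
--         elif cnt == 1:
--             best[idx] += pi
--     return free + max(best)
-- ===== Notes on version B (the rewrite author's own statement) =====
-- stated objective: simpler
-- what changed: Replaced the event-dict sweep-line (grouping start/end/person events per coordinate, sorting keys and each event list, maintaining an active set) by a direct nested scan that, for each person, counts the clouds covering them; Pre_ excludes the inputs where A raises IndexError (x shorter than p, or r shorter than y) and the inputs with a negative radius, which lie outside the task's natural domain of cloud radii and where A's sweep never closes the degenerate cloud.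
-- outside the precondition, e.g. on maximumPeople([5], [10], [0, 10], [-1, 1]): A returns 0, B returns 5
import Mathlib
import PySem

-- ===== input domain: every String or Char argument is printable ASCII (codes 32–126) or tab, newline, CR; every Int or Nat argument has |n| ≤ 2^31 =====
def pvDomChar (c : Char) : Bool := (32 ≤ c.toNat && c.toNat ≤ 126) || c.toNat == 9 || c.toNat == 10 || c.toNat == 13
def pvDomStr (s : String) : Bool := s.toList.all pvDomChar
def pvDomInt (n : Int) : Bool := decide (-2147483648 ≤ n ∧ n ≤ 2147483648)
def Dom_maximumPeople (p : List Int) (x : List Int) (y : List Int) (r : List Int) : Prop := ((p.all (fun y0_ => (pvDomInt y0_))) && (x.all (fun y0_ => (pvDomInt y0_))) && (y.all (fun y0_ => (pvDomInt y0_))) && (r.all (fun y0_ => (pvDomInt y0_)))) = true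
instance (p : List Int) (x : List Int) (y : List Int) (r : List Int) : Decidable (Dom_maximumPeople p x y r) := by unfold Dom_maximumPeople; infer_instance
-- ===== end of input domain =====

-- B replaces A's event-dict sweep-line by a direct nested coverage scan per person
-- (alternative decomposition of the same task; not claimed faster).

-- ===== PORT A =====
-- `events[k].append(e)` after an `in`-test / `events[k] = [e]` — A's branchy dict update
def pvAPush (d : PySem.Dict Int (List (Int × Int))) (k : Int) (e : Int × Int) :
    PySem.Dict Int (List (Int × Int)) :=
  if d.contains k then d.insert k ((d.getD k []) ++ [e]) else d.insert k [e]

-- first loop: for i in range(n): person event (2, p[i]) keyed by x[i] (indices in range under Pre_)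
def pvAEventsP (p x : List Int) : PySem.Dict Int (List (Int × Int)) :=
  (PySem.List.pyRange 0 (p.length : Int) 1).foldl
    (fun d i => pvAPush d (PySem.List.pyGetD x i 0) (2, PySem.List.pyGetD p i 0))
    PySem.Dict.empty

-- second loop: start event (1, i+1) at y[i]-r[i], end event (-1, i+1) at y[i]+r[i]+1
def pvAEvents (p x y r : List Int) : PySem.Dict Int (List (Int × Int)) :=
  (PySem.List.pyRange 0 (y.length : Int) 1).foldl
    (fun d i =>
      pvAPush (pvAPush d (PySem.List.pyGetD y i 0 - PySem.List.pyGetD r i 0) (1, i + 1))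
        (PySem.List.pyGetD y i 0 + PySem.List.pyGetD r i 0 + 1) (-1, i + 1))
    (pvAEventsP p x)

-- the event dispatch inside the nested `for` loops
def pvAStep (st : Int × PySem.Set Int × List Int) (ev : Int × Int) :
    Int × PySem.Set Int × List Int :=
  if ev.1 = -1 then (st.1, PySem.Set.discard st.2.1 ev.2, st.2.2)
  else if ev.1 = 1 then (st.1, PySem.Set.add st.2.1 ev.2, st.2.2)
  else if PySem.Set.len st.2.1 = 1 then
    let j := PySem.List.pyGetD st.2.1 0 0
    (st.1, st.2.1, PySem.List.pySetD st.2.2 j (PySem.List.pyGetD st.2.2 j 0 + ev.2))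
  else if PySem.Set.len st.2.1 = 0 then (st.1 + ev.2, st.2.1, st.2.2)
  else st

def maximumPeople (p : List Int) (x : List Int) (y : List Int) (r : List Int) : Int :=
  let events := pvAEvents p x y r
  let fin := (PySem.List.sorted events.keys (fun k => k) false).foldl
    (fun st cord =>
      -- events[cord] (cord is always a key); v.sort() sorts the int pairs lexicographically
      (PySem.List.sorted2 (events.getD cord []) Prod.fst Prod.snd false).foldl pvAStep st)
    (0, (PySem.Set.empty : PySem.Set Int), List.replicate (y.length + 1) 0)
  -- max(bomber_pop): the list has length m+1 ≥ 1, never empty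
  fin.1 + (PySem.List.max? fin.2.2 (fun v => v)).getD 0

-- ===== PORT B =====
-- inner loop body: count the clouds whose interval [y-r, y+r] contains the person,
-- remembering the (last) covering index + 1
def pvCloudCheck (xi : Int) (s : Int × Int) (jc : Int × (Int × Int)) : Int × Int :=
  if jc.2.1 - jc.2.2 ≤ xi ∧ xi ≤ jc.2.1 + jc.2.2 then (s.1 + 1, jc.1 + 1) else s

-- per-person update of (free, best)
def pvBStep (clouds : List (Int × Int)) (st : Int × List Int) (q : Int × Int) :
    Int × List Int :=
  let ci := (PySem.List.enumerate clouds).foldl (pvCloudCheck q.2) (0, 0)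
  if ci.1 = 0 then (st.1 + q.1, st.2)
  else if ci.1 = 1 then
    (st.1, PySem.List.pySetD st.2 ci.2 (PySem.List.pyGetD st.2 ci.2 0 + q.1))
  else st

def maximumPeople_alt (p : List Int) (x : List Int) (y : List Int) (r : List Int) : Int :=
  let clouds := y.zip r
  let fin := (p.zip x).foldl (pvBStep clouds) (0, List.replicate (y.length + 1) 0)
  -- max(best): the list has length m+1 ≥ 1, never empty
  fin.1 + (PySem.List.max? fin.2 (fun v => v)).getD 0

-- ===== PRECONDITION & SPEC =====
-- Pre_ excludes (a) the inputs where A raises IndexError: x shorter than p, or r shorter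
-- than y; and (b) inputs with a negative radius, which lie outside the task's natural
-- domain of cloud radii and where A's sweep never closes the degenerate cloud.
def Pre_maximumPeople (p : List Int) (x : List Int) (y : List Int) (r : List Int) : Prop :=
  p.length ≤ x.length ∧ y.length ≤ r.length ∧ ∀ a ∈ r, 0 ≤ a
instance (p : List Int) (x : List Int) (y : List Int) (r : List Int) :
    Decidable (Pre_maximumPeople p x y r) := by unfold Pre_maximumPeople; infer_instance

def pvWitness_maximumPeople : List Int × List Int × List Int × List Int :=
  ([3, 4], [1, 5], [2], [1])

def Spec_maximumPeople (p : List Int) (x : List Int) (y : List Int) (r : List Int) (out : Int) : Prop := out = maximumPeople_alt p x y r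
instance (p : List Int) (x : List Int) (y : List Int) (r : List Int) (out : Int) : Decidable (Spec_maximumPeople p x y r out) := by unfold Spec_maximumPeople; infer_instance

-- ===== CLAIM (what is proved, stated in full; the proofs are below) =====
def Claim_equal_maximumPeople : Prop := ∀ (p : List Int) (x : List Int) (y : List Int) (r : List Int), Dom_maximumPeople p x y r → Pre_maximumPeople p x y r → Spec_maximumPeople p x y r (maximumPeople p x y r)

-- ===== LEMMAS AND PROOFS =====

-- proof-side vocabulary: a cloud (yj, rj) covers c iff pvLo ≤ c < pvHi, the half-open
-- form of B's closed interval [y-r, y+r]; under Pre_ (r ≥ 0) this is also exactly how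
-- the sweep's (start, end+1) events play out
def pvLo (q : Int × Int) : Int := q.1 - q.2
def pvHi (q : Int × Int) : Int := q.1 + q.2 + 1
def pvCovB (c : Int) (q : Int × Int) : Bool :=
  decide (pvLo q ≤ c ∧ c < pvHi q)
def pvIdxs (cl : List (Int × Int)) (c : Int) : List Int :=
  ((PySem.List.enumerate cl).filter (fun jq => pvCovB c jq.2)).map (fun jq => jq.1 + 1)
def pvFree (cl : List (Int × Int)) (l : List (Int × Int)) : Int :=
  ((l.filter (fun q => decide (pvIdxs cl q.2 = []))).map (·.1)).sum
def pvGain (cl : List (Int × Int)) (k : Int) (l : List (Int × Int)) : Int :=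
  ((l.filter (fun q => decide (pvIdxs cl q.2 = [k]))).map (·.1)).sum
def pvL1 (P : List (Int × Int)) : List (Int × (Int × Int)) :=
  P.map (fun q => (q.2, (2, q.1)))
def pvL2 (cl : List (Int × Int)) : List (Int × (Int × Int)) :=
  (PySem.List.enumerate cl).flatMap
    (fun jq => [(pvLo jq.2, (1, jq.1 + 1)), (pvHi jq.2, (-1, jq.1 + 1))])
def pvCoords (P cl : List (Int × Int)) : List Int := (pvL1 P ++ pvL2 cl).map (·.1)
def pvEvAt (P cl : List (Int × Int)) (c : Int) : List (Int × Int) :=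
  ((pvL1 P ++ pvL2 cl).filter (fun e => e.1 == c)).map (·.2)
def pvPersAt (P : List (Int × Int)) (c : Int) : List (Int × Int) :=
  P.filter (fun q => q.2 == c)

theorem pvAPush_eq_modify (d : PySem.Dict Int (List (Int × Int))) (k : Int) (e : Int × Int) :
    pvAPush d k e = d.modify k [] (· ++ [e]) := by
  unfold pvAPush PySem.Dict.modify
  by_cases h : d.contains k
  · simp [h]
  · have hg : d.getD k [] = [] := PySem.Dict.getD_of_not_contains d [] (by simpa using h)
    simp [h, hg]

theorem pvFree_cons (cl : List (Int × Int)) (q : Int × Int) (l : List (Int × Int)) :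
    pvFree cl (q :: l) = (if pvIdxs cl q.2 = [] then q.1 else 0) + pvFree cl l := by
  unfold pvFree
  by_cases h : pvIdxs cl q.2 = [] <;> simp [h]

theorem pvGain_cons (cl : List (Int × Int)) (k : Int) (q : Int × Int) (l : List (Int × Int)) :
    pvGain cl k (q :: l) = (if pvIdxs cl q.2 = [k] then q.1 else 0) + pvGain cl k l := by
  unfold pvGain
  by_cases h : pvIdxs cl q.2 = [k] <;> simp [h]

theorem pvFree_append (cl : List (Int × Int)) (l1 l2 : List (Int × Int)) :
    pvFree cl (l1 ++ l2) = pvFree cl l1 + pvFree cl l2 := by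
  unfold pvFree; simp

theorem pvGain_append (cl : List (Int × Int)) (k : Int) (l1 l2 : List (Int × Int)) :
    pvGain cl k (l1 ++ l2) = pvGain cl k l1 + pvGain cl k l2 := by
  unfold pvGain; simp

theorem pvFree_perm (cl : List (Int × Int)) {l l' : List (Int × Int)} (h : l.Perm l') :
    pvFree cl l = pvFree cl l' := by
  exact List.Perm.sum_eq (((h.filter _).map _))

theorem pvGain_perm (cl : List (Int × Int)) (k : Int) {l l' : List (Int × Int)} (h : l.Perm l') :
    pvGain cl k l = pvGain cl k l' := by
  exact List.Perm.sum_eq (((h.filter _).map _))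

-- the inner loop counts the covering clouds and keeps the last covering index + 1
theorem pvInner_char (xi : Int) : ∀ (cl : List (Int × Int)) (k c0 i0 : Int),
    (PySem.List.enumerate cl k).foldl (pvCloudCheck xi) (c0, i0)
    = (c0 + (((PySem.List.enumerate cl k).filter (fun jq => pvCovB xi jq.2)).length : Int),
       ((((PySem.List.enumerate cl k).filter (fun jq => pvCovB xi jq.2)).map
          (fun jq => jq.1 + 1)).getLastD i0)) := by
  intro cl
  induction cl with
  | nil => intro k c0 i0; simp [PySem.List.enumerate_nil]
  | cons q t ih =>
    intro k c0 i0
    rw [PySem.List.enumerate_cons]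
    by_cases h : pvCovB xi q
    · simp only [List.foldl_cons, List.filter_cons]
      rw [show pvCloudCheck xi (c0, i0) (k, q) = (c0 + 1, k + 1) by
        simp [pvCloudCheck, pvCovB, pvLo, pvHi] at h ⊢; omega]
      rw [ih]
      rw [if_pos h]
      simp only [List.map_cons, Prod.mk.injEq]
      constructor
      · simp only [List.length_cons]; push_cast; omega
      · rw [List.getLastD_cons]
    · simp only [List.foldl_cons, List.filter_cons]
      rw [show pvCloudCheck xi (c0, i0) (k, q) = (c0, i0) by
        simp [pvCloudCheck, pvCovB, pvLo, pvHi] at h ⊢; omega]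
      rw [ih]
      rw [if_neg (by simp [h])]

theorem pvIdxs_mem_bounds {cl : List (Int × Int)} {c k : Int} (h : k ∈ pvIdxs cl c) :
    1 ≤ k ∧ k ≤ (cl.length : Int) := by
  unfold pvIdxs at h
  rcases List.mem_map.1 h with ⟨jq, hjq, rfl⟩
  rcases (PySem.List.mem_enumerate_iff _ _ _).1 (List.mem_of_mem_filter hjq) with ⟨j, hj, rfl⟩
  simp; omega

theorem pvBStep_case0 (cl : List (Int × Int)) (f0 : Int) (b0 : List Int) (q : Int × Int)
    (h : pvIdxs cl q.2 = []) : pvBStep cl (f0, b0) q = (f0 + q.1, b0) := by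
  unfold pvBStep
  rw [pvInner_char]
  have : ((PySem.List.enumerate cl).filter (fun jq => pvCovB q.2 jq.2)).length = 0 := by
    have := congrArg List.length h
    simpa [pvIdxs] using this
  simp [this]

theorem pvBStep_case1 (cl : List (Int × Int)) (f0 : Int) (b0 : List Int) (q : Int × Int)
    {k0 : Int} (h : pvIdxs cl q.2 = [k0]) :
    pvBStep cl (f0, b0) q = (f0, b0.set k0.toNat (b0.getD k0.toNat 0 + q.1)) := by
  unfold pvBStep
  rw [pvInner_char]
  have hk0 : (1:Int) ≤ k0 := (pvIdxs_mem_bounds (h ▸ List.mem_singleton_self k0)).1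
  have hlen : ((PySem.List.enumerate cl).filter (fun jq => pvCovB q.2 jq.2)).length = 1 := by
    have := congrArg List.length h
    simpa [pvIdxs] using this
  have hlast : (((PySem.List.enumerate cl).filter (fun jq => pvCovB q.2 jq.2)).map
      (fun jq => jq.1 + 1)).getLastD 0 = k0 := by
    have : pvIdxs cl q.2 = [k0] := h
    unfold pvIdxs at this
    rw [this]
    rfl
  simp only [hlen, hlast]
  norm_num
  rw [PySem.List.pySetD_of_nonneg _ _ (by omega), PySem.List.pyGetD_of_nonneg _ _ (by omega)]
  simp [List.getD]

theorem pvBStep_case2 (cl : List (Int × Int)) (f0 : Int) (b0 : List Int) (q : Int × Int)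
    (h : 2 ≤ (pvIdxs cl q.2).length) : pvBStep cl (f0, b0) q = (f0, b0) := by
  unfold pvBStep
  rw [pvInner_char]
  have hlen : 2 ≤ ((PySem.List.enumerate cl).filter (fun jq => pvCovB q.2 jq.2)).length := by
    simpa [pvIdxs] using h
  have h1 : ¬ ((0:Int) + (((PySem.List.enumerate cl).filter (fun jq => pvCovB q.2 jq.2)).length : Int) = 0) := by omega
  have h2 : ¬ ((0:Int) + (((PySem.List.enumerate cl).filter (fun jq => pvCovB q.2 jq.2)).length : Int) = 1) := by omega
  rw [if_neg h1, if_neg h2]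

theorem pvBStep_foldl (cl : List (Int × Int)) : ∀ (l : List (Int × Int)) (f0 : Int) (b0 : List Int),
    (cl.length : Int) < (b0.length : Int) →
    l.foldl (pvBStep cl) (f0, b0) =
      ((f0 + pvFree cl l, (l.foldl (pvBStep cl) (f0, b0)).2) : Int × List Int)
    ∧ (l.foldl (pvBStep cl) (f0, b0)).2.length = b0.length
    ∧ ∀ k : Nat, k < b0.length →
        (l.foldl (pvBStep cl) (f0, b0)).2.getD k 0 = b0.getD k 0 + pvGain cl (k : Int) l := by
  intro l
  induction l with
  | nil => intro f0 b0 hb; simp [pvFree, pvGain]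
  | cons q t ih =>
    intro f0 b0 hb
    rcases hsplit : pvIdxs cl q.2 with _ | ⟨k0, _ | ⟨k1, rest⟩⟩
    · -- cnt 0
      have hstep := pvBStep_case0 cl f0 b0 q hsplit
      simp only [List.foldl_cons, hstep]
      rcases ih (f0 + q.1) b0 hb with ⟨h1, h2, h3⟩
      refine ⟨?_, h2, ?_⟩
      · rw [h1, pvFree_cons, hsplit]; simp [add_assoc]
      · intro k hk
        rw [h3 k hk, pvGain_cons, hsplit]
        have : ¬ ([] : List Int) = [(k:Int)] := by simp
        simp [this]
    · -- cnt 1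
      have hstep := pvBStep_case1 cl f0 b0 q hsplit
      have hk0 := pvIdxs_mem_bounds (hsplit ▸ List.mem_singleton_self k0)
      have hk0n : k0.toNat < b0.length := by omega
      simp only [List.foldl_cons, hstep]
      have hb' : (cl.length : Int) < ((b0.set k0.toNat (b0.getD k0.toNat 0 + q.1)).length : Int) := by
        simpa using hb
      rcases ih f0 _ hb' with ⟨h1, h2, h3⟩
      refine ⟨?_, by simpa using h2, ?_⟩
      · rw [h1, pvFree_cons, hsplit]; simp
      · intro k hk
        rw [h3 k (by simpa using hk), pvGain_cons, hsplit]
        by_cases hkk : (k : Int) = k0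
        · have hkn : k = k0.toNat := by omega
          subst hkn
          simp [List.getD, List.getElem?_set_self', hkk, List.getElem?_eq_getElem hk]
          ring
        · have : k ≠ k0.toNat := by omega
          simp [List.getD, List.getElem?_set_ne (by omega : k0.toNat ≠ k)]
          intro hc; exact absurd hc.symm hkk
    · -- cnt ≥ 2
      have hstep := pvBStep_case2 cl f0 b0 q (by rw [hsplit]; simp)
      simp only [List.foldl_cons, hstep]
      rcases ih f0 b0 hb with ⟨h1, h2, h3⟩
      refine ⟨?_, h2, ?_⟩
      · rw [h1, pvFree_cons, hsplit]; simp
      · intro k hk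
        rw [h3 k hk, pvGain_cons, hsplit]
        have : ¬ (k0 :: k1 :: rest) = [(k:Int)] := by simp
        simp [this]

-- insertion sort with an asymmetric transitive `before` yields Pairwise (no later element `before` an earlier one)
theorem pvInsertBy_pairwise {α : Type} (before : α → α → Bool)
    (htr : ∀ a b c, before a b = true → before b c = true → before a c = true)
    (hcon : ∀ a b, before a b = true → before b a = false) :
    ∀ (x : α) (ys : List α), ys.Pairwise (fun a b => before b a = false) →
      (PySem.List.insertBy before x ys).Pairwise (fun a b => before b a = false) := by
  intro x ys
  induction ys with
  | nil => intro _; simp [PySem.List.insertBy]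
  | cons y t ih =>
    intro hp
    rw [List.pairwise_cons] at hp
    unfold PySem.List.insertBy
    by_cases hxy : before x y = true
    · rw [if_pos hxy]
      refine List.Pairwise.cons ?_ (List.Pairwise.cons hp.1 hp.2)
      intro z hz
      rcases List.mem_cons.1 hz with rfl | hz
      · exact hcon _ _ hxy
      · by_cases hzx : before z x = true
        · have := htr _ _ _ hzx hxy
          rw [hp.1 z hz] at this; exact absurd this (by simp)
        · simpa using hzx
    · rw [if_neg hxy]
      refine List.Pairwise.cons ?_ (ih hp.2)
      intro z hz
      rcases (PySem.List.mem_insertBy _ _ _ _).1 hz with rfl | hz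
      · simpa using hxy
      · exact hp.1 z hz

-- sorted2 by (fst, snd) has nondecreasing first components
theorem pvSorted2_fst_mono (v : List (Int × Int)) :
    (PySem.List.sorted2 v Prod.fst Prod.snd false).Pairwise (fun a b => a.1 ≤ b.1) := by
  have hgen : ∀ (w : List (Int × Int)) (acc : List (Int × Int)),
      acc.Pairwise (fun a b : Int × Int =>
        (decide (b.1 < a.1) || (!decide (a.1 < b.1) && decide (b.2 < a.2))) = false) →
      (w.foldl (fun acc x => PySem.List.insertBy
        (fun a b : Int × Int => decide (a.1 < b.1) || (!decide (b.1 < a.1) && decide (a.2 < b.2))) x acc) acc).Pairwise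
        (fun a b : Int × Int =>
          (decide (b.1 < a.1) || (!decide (a.1 < b.1) && decide (b.2 < a.2))) = false) := by
    intro w
    induction w with
    | nil => intro acc h; simpa using h
    | cons z t ih =>
      intro acc h
      simp only [List.foldl_cons]
      refine ih _ ?_
      refine pvInsertBy_pairwise _ ?_ ?_ z acc h
      · intro a b c hab hbc
        simp only [Bool.or_eq_true, Bool.and_eq_true, Bool.not_eq_eq_eq_not, Bool.not_true,
          decide_eq_true_eq, decide_eq_false_iff_not] at hab hbc ⊢
        omega
      · intro a b hab
        simp only [Bool.or_eq_true, Bool.and_eq_true, Bool.not_eq_eq_eq_not, Bool.not_true,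
          decide_eq_true_eq, decide_eq_false_iff_not] at hab
        simp only [Bool.or_eq_false_iff, Bool.and_eq_false_iff, Bool.not_eq_eq_eq_not, Bool.not_false,
          decide_eq_true_eq, decide_eq_false_iff_not]
        omega
  have := hgen v [] (by simp)
  have h2 : (PySem.List.sorted2 v Prod.fst Prod.snd false) =
      (v.foldl (fun acc x => PySem.List.insertBy
        (fun a b : Int × Int => decide (a.1 < b.1) || (!decide (b.1 < a.1) && decide (a.2 < b.2))) x acc) []) := rfl
  rw [h2]
  refine this.imp ?_
  intro a b hab
  simp only [Bool.or_eq_false_iff, decide_eq_false_iff_not] at hab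
  omega

-- a tag-sorted event list is its (-1)-events, then its 1-events, then its 2-events
theorem pvGrouped : ∀ (l : List (Int × Int)),
    l.Pairwise (fun a b => a.1 ≤ b.1) →
    (∀ e ∈ l, e.1 = -1 ∨ e.1 = 1 ∨ e.1 = 2) →
    l = l.filter (fun e => e.1 == -1) ++ l.filter (fun e => e.1 == 1)
        ++ l.filter (fun e => e.1 == 2) := by
  intro l
  induction l with
  | nil => intro _ _; simp
  | cons a t ih =>
    intro hp htag
    rw [List.pairwise_cons] at hp
    have hrec := ih hp.2 (fun e he => htag e (List.mem_cons_of_mem a he))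
    have hnil : ∀ b : Int, (∀ e ∈ t, ¬ e.1 = b) → t.filter (fun e => e.1 == b) = [] := by
      intro b hb
      rw [List.filter_eq_nil_iff]
      intro e he
      simpa using hb e he
    rcases htag a (List.mem_cons_self) with ha | ha | ha
    · rw [List.filter_cons, List.filter_cons, List.filter_cons,
        if_pos (by simp [ha]), if_neg (by simp [ha]), if_neg (by simp [ha])]
      simp only [List.cons_append]
      exact congrArg _ hrec
    · have h1 : t.filter (fun e => e.1 == -1) = [] := by
        refine hnil _ ?_
        intro e he
        have := hp.1 e he
        rcases htag e (List.mem_cons_of_mem a he) with h | h | h <;> omega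
      rw [List.filter_cons, List.filter_cons, List.filter_cons,
        if_neg (by simp [ha]), if_pos (by simp [ha]), if_neg (by simp [ha]), h1]
      rw [h1] at hrec
      simp only [List.nil_append]
      exact congrArg _ hrec
    · have h1 : t.filter (fun e => e.1 == -1) = [] := by
        refine hnil _ ?_
        intro e he
        have := hp.1 e he
        rcases htag e (List.mem_cons_of_mem a he) with h | h | h <;> omega
      have h2 : t.filter (fun e => e.1 == 1) = [] := by
        refine hnil _ ?_
        intro e he
        have := hp.1 e he
        rcases htag e (List.mem_cons_of_mem a he) with h | h | h <;> omega
      rw [List.filter_cons, List.filter_cons, List.filter_cons,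
        if_neg (by simp [ha]), if_neg (by simp [ha]), if_pos (by simp [ha]), h1, h2]
      rw [h1, h2] at hrec
      simp only [List.nil_append]
      exact congrArg _ hrec

theorem pvAStep_rem : ∀ (rl : List (Int × Int)) (st : Int × PySem.Set Int × List Int),
    (∀ e ∈ rl, e.1 = -1) →
    rl.foldl pvAStep st = (st.1, rl.foldl (fun s e => PySem.Set.discard s e.2) st.2.1, st.2.2) := by
  intro rl
  induction rl with
  | nil => intro st _; rfl
  | cons e t ih =>
    intro st he
    simp only [List.foldl_cons]
    rw [show pvAStep st e = (st.1, PySem.Set.discard st.2.1 e.2, st.2.2) by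
      unfold pvAStep; rw [if_pos (he e List.mem_cons_self)]]
    exact ih _ (fun e' h => he e' (List.mem_cons_of_mem e h))

theorem pvAStep_add : ∀ (al : List (Int × Int)) (st : Int × PySem.Set Int × List Int),
    (∀ e ∈ al, e.1 = 1) →
    al.foldl pvAStep st = (st.1, al.foldl (fun s e => PySem.Set.add s e.2) st.2.1, st.2.2) := by
  intro al
  induction al with
  | nil => intro st _; rfl
  | cons e t ih =>
    intro st he
    simp only [List.foldl_cons]
    rw [show pvAStep st e = (st.1, PySem.Set.add st.2.1 e.2, st.2.2) by
      unfold pvAStep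
      rw [if_neg (by rw [he e List.mem_cons_self]; omega), if_pos (he e List.mem_cons_self)]]
    exact ih _ (fun e' h => he e' (List.mem_cons_of_mem e h))

theorem pvDiscard_foldl_mem (rl : List (Int × Int)) : ∀ (s : PySem.Set Int) (a : Int),
    a ∈ rl.foldl (fun s e => PySem.Set.discard s e.2) s ↔ a ∈ s ∧ ∀ e ∈ rl, a ≠ e.2 := by
  induction rl with
  | nil => intro s a; simp
  | cons e t ih =>
    intro s a
    simp only [List.foldl_cons]
    rw [ih]
    rw [PySem.Set.mem_discard]
    constructor
    · rintro ⟨⟨h1, h2⟩, h3⟩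
      exact ⟨h1, by
        intro e' he'
        rcases List.mem_cons.1 he' with rfl | he' <;> [exact h2; exact h3 e' he']⟩
    · rintro ⟨h1, h2⟩
      exact ⟨⟨h1, h2 e List.mem_cons_self⟩, fun e' he' => h2 e' (List.mem_cons_of_mem e he')⟩

theorem pvDiscard_foldl_nodup (rl : List (Int × Int)) : ∀ (s : PySem.Set Int),
    s.Nodup → (rl.foldl (fun s e => PySem.Set.discard s e.2) s).Nodup := by
  induction rl with
  | nil => intro s h; exact h
  | cons e t ih => intro s h; exact ih _ (PySem.Set.nodup_discard _ _ h)

theorem pvAdd_foldl_nodup (al : List (Int × Int)) : ∀ (s : PySem.Set Int),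
    s.Nodup → (al.foldl (fun s e => PySem.Set.add s e.2) s).Nodup := by
  induction al with
  | nil => intro s h; exact h
  | cons e t ih => intro s h; exact ih _ (PySem.Set.nodup_add _ _ h)

theorem pvAStep_pers_empty : ∀ (pl : List (Int × Int)) (f0 : Int) (b0 : List Int),
    (∀ e ∈ pl, e.1 = 2) →
    pl.foldl pvAStep (f0, ([] : PySem.Set Int), b0)
      = (f0 + (pl.map (·.2)).sum, ([] : PySem.Set Int), b0) := by
  intro pl
  induction pl with
  | nil => intro f0 b0 _; simp
  | cons e t ih =>
    intro f0 b0 he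
    simp only [List.foldl_cons]
    rw [show pvAStep (f0, ([] : PySem.Set Int), b0) e = (f0 + e.2, ([] : PySem.Set Int), b0) by
      unfold pvAStep
      rw [if_neg (by rw [he e List.mem_cons_self]; omega),
        if_neg (by rw [he e List.mem_cons_self]; omega),
        if_neg (by simp [PySem.Set.len]), if_pos (by simp [PySem.Set.len])]]
    rw [ih _ _ (fun e' h => he e' (List.mem_cons_of_mem e h))]
    simp [add_assoc]

theorem pvAStep_pers_one : ∀ (pl : List (Int × Int)) (f0 : Int) (a : Int) (b0 : List Int),
    (∀ e ∈ pl, e.1 = 2) → 0 ≤ a → a.toNat < b0.length →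
    pl.foldl pvAStep (f0, ([a] : PySem.Set Int), b0)
      = (f0, ([a] : PySem.Set Int), b0.set a.toNat (b0.getD a.toNat 0 + (pl.map (·.2)).sum)) := by
  intro pl
  induction pl with
  | nil =>
    intro f0 a b0 _ ha hlen
    simp only [List.foldl_nil, List.map_nil, List.sum_nil, add_zero]
    rw [List.getD_eq_getElem b0 0 hlen, List.set_getElem_self hlen]
  | cons e t ih =>
    intro f0 a b0 he ha hlen
    simp only [List.foldl_cons]
    rw [show pvAStep (f0, ([a] : PySem.Set Int), b0) e
        = (f0, ([a] : PySem.Set Int), b0.set a.toNat (b0.getD a.toNat 0 + e.2)) by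
      unfold pvAStep
      rw [if_neg (by rw [he e List.mem_cons_self]; omega),
        if_neg (by rw [he e List.mem_cons_self]; omega),
        if_pos (by simp [PySem.Set.len])]
      show (f0, [a], PySem.List.pySetD b0 (PySem.List.pyGetD [a] 0 0) _) = _
      rw [show PySem.List.pyGetD ([a] : List Int) 0 0 = a from rfl]
      rw [PySem.List.pySetD_of_nonneg _ _ ha, PySem.List.pyGetD_of_nonneg _ _ ha]]
    rw [ih _ _ _ (fun e' h => he e' (List.mem_cons_of_mem e h)) ha (by simpa using hlen)]
    rw [List.set_set]
    congr 2
    rw [List.getD_eq_getElem _ 0 (by simpa using hlen),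
      List.getElem_set_self (by simpa using hlen)]
    simp [add_assoc]

theorem pvAStep_pers_many : ∀ (pl : List (Int × Int)) (st : Int × PySem.Set Int × List Int),
    (∀ e ∈ pl, e.1 = 2) → 2 ≤ st.2.1.length →
    pl.foldl pvAStep st = st := by
  intro pl
  induction pl with
  | nil => intro st _ _; rfl
  | cons e t ih =>
    intro st he hlen
    simp only [List.foldl_cons]
    rw [show pvAStep st e = st by
      unfold pvAStep
      rw [if_neg (by rw [he e List.mem_cons_self]; omega),
        if_neg (by rw [he e List.mem_cons_self]; omega),
        if_neg (by simp only [PySem.Set.len]; omega), if_neg (by simp only [PySem.Set.len]; omega)]]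
    exact ih _ (fun e' h => he e' (List.mem_cons_of_mem e h)) hlen

theorem pvRangeMap_L1 (p x : List Int) (hpx : p.length ≤ x.length) :
    (PySem.List.pyRange 0 (p.length : Int) 1).map
      (fun i => ((PySem.List.pyGetD x i 0 : Int), ((2 : Int), PySem.List.pyGetD p i 0)))
      = pvL1 (p.zip x) := by
  rw [PySem.List.pyRange_zero_natCast, List.map_map]
  unfold pvL1
  apply List.ext_getElem
  · simp [List.length_zip]; omega
  · intro i h1 h2
    simp only [List.getElem_map, Function.comp_apply, List.getElem_range, List.getElem_zip]
    have hip : i < p.length := by simpa using h1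
    have hix : i < x.length := by omega
    rw [PySem.List.pyGetD_natCast, PySem.List.pyGetD_natCast,
      List.getD_eq_getElem x 0 hix, List.getD_eq_getElem p 0 hip]

theorem pvEventsP_eq (p x : List Int) (hpx : p.length ≤ x.length) :
    pvAEventsP p x
      = (pvL1 (p.zip x)).foldl (fun d e => d.modify e.1 [] (· ++ [e.2])) PySem.Dict.empty := by
  unfold pvAEventsP
  simp only [pvAPush_eq_modify]
  rw [← pvRangeMap_L1 p x hpx, List.foldl_map]

theorem pvRangeFlat_L2 (y r : List Int) (hyr : y.length ≤ r.length) :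
    (PySem.List.pyRange 0 (y.length : Int) 1).flatMap
      (fun i => [((PySem.List.pyGetD y i 0 - PySem.List.pyGetD r i 0 : Int), ((1:Int), i + 1)),
                 ((PySem.List.pyGetD y i 0 + PySem.List.pyGetD r i 0 + 1 : Int), ((-1:Int), i + 1))])
      = pvL2 (y.zip r) := by
  unfold pvL2
  rw [PySem.List.enumerate_eq_map_pyRange (y.zip r) (0, 0)]
  rw [List.flatMap_def, List.flatMap_def, List.map_map]
  congr 1
  have hlen : PySem.List.len (y.zip r) = (y.length : Int) := by
    simp [PySem.List.len, List.length_zip]; omega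
  rw [hlen]
  apply List.map_congr_left
  intro a ha
  have hmem := PySem.List.mem_pyRange_one.1 ha
  have h0 : 0 ≤ a := hmem.1
  have h1 : a < (y.length : Int) := hmem.2
  have hay : a.toNat < y.length := by omega
  have har : a.toNat < r.length := by omega
  have hz : a.toNat < (y.zip r).length := by simp [List.length_zip]; omega
  have hg : PySem.List.pyGetD (y.zip r) a (0, 0) = (y[a.toNat], r[a.toNat]) := by
    rw [PySem.List.pyGetD_of_nonneg _ _ h0, List.getD_eq_getElem _ _ hz, List.getElem_zip]
  have hgy : PySem.List.pyGetD y a 0 = y[a.toNat] := by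
    rw [PySem.List.pyGetD_of_nonneg _ _ h0, List.getD_eq_getElem _ _ hay]
  have hgr : PySem.List.pyGetD r a 0 = r[a.toNat] := by
    rw [PySem.List.pyGetD_of_nonneg _ _ h0, List.getD_eq_getElem _ _ har]
  simp only [Function.comp_apply, hg, hgy, hgr, pvLo, pvHi]

theorem pvEvents_eq (p x y r : List Int) (hpx : p.length ≤ x.length) (hyr : y.length ≤ r.length) :
    pvAEvents p x y r
      = (pvL1 (p.zip x) ++ pvL2 (y.zip r)).foldl
          (fun d e => d.modify e.1 [] (· ++ [e.2])) PySem.Dict.empty := by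
  unfold pvAEvents
  simp only [pvAPush_eq_modify]
  rw [List.foldl_append, ← pvEventsP_eq p x hpx, ← pvRangeFlat_L2 y r hyr, List.foldl_flatMap]
  congr 1

theorem pvEvents_getD (p x y r : List Int) (hpx : p.length ≤ x.length)
    (hyr : y.length ≤ r.length) (c : Int) :
    (pvAEvents p x y r).getD c [] = pvEvAt (p.zip x) (y.zip r) c := by
  rw [pvEvents_eq p x y r hpx hyr, PySem.Dict.getD_foldl_modify_append]
  simp [pvEvAt]

theorem pvEvents_keys (p x y r : List Int) (hpx : p.length ≤ x.length)
    (hyr : y.length ≤ r.length) :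
    (pvAEvents p x y r).keys = PySem.Set.ofList (pvCoords (p.zip x) (y.zip r)) := by
  rw [pvEvents_eq p x y r hpx hyr]
  have := PySem.Dict.keys_foldl_modify_key (pvL1 (p.zip x) ++ pvL2 (y.zip r)) Prod.fst
    ([] : List (Int × Int)) (fun _ e => (· ++ [e.2])) PySem.Dict.empty
  simp only [PySem.Dict.keys_empty, PySem.Set.update_nil_left] at this
  exact this

-- membership in the canonical event list at coordinate c
theorem pvMem_evAt (P cl : List (Int × Int)) (c : Int) (e : Int × Int) :
    e ∈ pvEvAt P cl c ↔
      (∃ q ∈ P, q.2 = c ∧ e = (2, q.1)) ∨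
      (∃ jq ∈ PySem.List.enumerate cl,
        (pvLo jq.2 = c ∧ e = (1, jq.1 + 1)) ∨ (pvHi jq.2 = c ∧ e = (-1, jq.1 + 1))) := by
  simp only [pvEvAt, pvL1, pvL2, List.mem_map, List.mem_filter, List.mem_append,
    List.mem_flatMap, List.mem_cons, List.not_mem_nil, or_false, beq_iff_eq]
  constructor
  · rintro ⟨w, ⟨hw | hw, hkey⟩, rfl⟩
    · rcases hw with ⟨q, hq, rfl⟩
      exact Or.inl ⟨q, hq, hkey, rfl⟩
    · rcases hw with ⟨jq, hjq, hcases⟩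
      rcases hcases with rfl | rfl
      · exact Or.inr ⟨jq, hjq, Or.inl ⟨hkey, rfl⟩⟩
      · exact Or.inr ⟨jq, hjq, Or.inr ⟨hkey, rfl⟩⟩
  · rintro (⟨q, hq, hc, rfl⟩ | ⟨jq, hjq, (⟨hc, rfl⟩ | ⟨hc, rfl⟩)⟩)
    · exact ⟨(q.2, (2, q.1)), ⟨Or.inl ⟨q, hq, rfl⟩, hc⟩, rfl⟩
    · exact ⟨(pvLo jq.2, (1, jq.1 + 1)), ⟨Or.inr ⟨jq, hjq, Or.inl rfl⟩, hc⟩, rfl⟩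
    · exact ⟨(pvHi jq.2, (-1, jq.1 + 1)), ⟨Or.inr ⟨jq, hjq, Or.inr rfl⟩, hc⟩, rfl⟩

theorem pvEvAt_tags (P cl : List (Int × Int)) (c : Int) :
    ∀ e ∈ pvEvAt P cl c, e.1 = -1 ∨ e.1 = 1 ∨ e.1 = 2 := by
  intro e he
  rcases (pvMem_evAt P cl c e).1 he with ⟨q, _, _, rfl⟩ | ⟨jq, _, (⟨_, rfl⟩ | ⟨_, rfl⟩)⟩
  · right; right; rfl
  · right; left; rfl
  · left; rfl

-- the tag-2 slice of the events at c is exactly the persons at c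
theorem pvEvAt_pers (P cl : List (Int × Int)) (c : Int) :
    (pvEvAt P cl c).filter (fun e => e.1 == 2)
      = (pvPersAt P c).map (fun q => ((2 : Int), q.1)) := by
  unfold pvEvAt pvPersAt
  rw [List.filter_map, List.filter_append]
  have h2 : ((pvL2 cl).filter (fun e => e.1 == c)).filter
      ((fun e : Int × Int => e.1 == 2) ∘ (·.2)) = [] := by
    rw [List.filter_eq_nil_iff]
    intro w hw
    have hw2 := List.mem_of_mem_filter hw
    simp only [pvL2, List.mem_flatMap, List.mem_cons, List.not_mem_nil, or_false] at hw2
    rcases hw2 with ⟨jq, _, rfl | rfl⟩ <;> simp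
  have h1 : ((pvL1 P).filter (fun e => e.1 == c)).filter
      ((fun e : Int × Int => e.1 == 2) ∘ (·.2)) = (pvL1 P).filter (fun e => e.1 == c) := by
    rw [List.filter_eq_self]
    intro w hw
    have hw2 := List.mem_of_mem_filter hw
    simp only [pvL1, List.mem_map] at hw2
    rcases hw2 with ⟨q, _, rfl⟩
    simp
  rw [List.filter_append, h2, h1, List.append_nil]
  unfold pvL1
  rw [List.filter_map, List.map_map]
  rfl

theorem pvIdxs_nodup (cl : List (Int × Int)) (c : Int) : (pvIdxs cl c).Nodup := by
  have h1 : ((PySem.List.enumerate cl).filter (fun jq => pvCovB c jq.2)).Pairwise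
      (fun p q => p.1 < q.1) := (PySem.List.pairwise_lt_enumerate cl 0).filter _
  unfold pvIdxs
  have h2 : (((PySem.List.enumerate cl).filter (fun jq => pvCovB c jq.2)).map
      (fun jq => jq.1 + 1)).Pairwise (· ≠ ·) := by
    refine List.Pairwise.map _ ?_ h1
    intro a b hab
    omega
  exact h2

theorem pvIdxs_mem (cl : List (Int × Int)) (c : Int) (a : Int) :
    a ∈ pvIdxs cl c ↔ ∃ jq ∈ PySem.List.enumerate cl, a = jq.1 + 1 ∧ pvCovB c jq.2 = true := by
  unfold pvIdxs
  simp only [List.mem_map, List.mem_filter]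
  constructor
  · rintro ⟨jq, ⟨hm, hc⟩, rfl⟩; exact ⟨jq, hm, rfl, hc⟩
  · rintro ⟨jq, hm, rfl, hc⟩; exact ⟨jq, ⟨hm, hc⟩, rfl⟩

-- an enumerated pair's payload is an element of the list
theorem pvEnum_snd_mem {cl : List (Int × Int)} {jq : Int × (Int × Int)}
    (h : jq ∈ PySem.List.enumerate cl) : jq.2 ∈ cl := by
  rcases (PySem.List.mem_enumerate_iff _ _ _).1 h with ⟨j, hj, rfl⟩
  exact List.getElem_mem hj

-- persons at one coordinate are all free or all covered alike
theorem pvFree_persAt (P cl : List (Int × Int)) (c : Int) :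
    pvFree cl (pvPersAt P c)
      = if pvIdxs cl c = [] then ((pvPersAt P c).map (·.1)).sum else 0 := by
  unfold pvFree
  by_cases h : pvIdxs cl c = []
  · rw [if_pos h, List.filter_eq_self.2]
    intro q hq
    have : q.2 = c := by simpa using (List.mem_filter.1 hq).2
    simp [this, h]
  · rw [if_neg h, List.filter_eq_nil_iff.2, List.map_nil, List.sum_nil]
    intro q hq
    have : q.2 = c := by simpa using (List.mem_filter.1 hq).2
    simp [this, h]

theorem pvGain_persAt (P cl : List (Int × Int)) (c k : Int) :
    pvGain cl k (pvPersAt P c)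
      = if pvIdxs cl c = [k] then ((pvPersAt P c).map (·.1)).sum else 0 := by
  unfold pvGain
  by_cases h : pvIdxs cl c = [k]
  · rw [if_pos h, List.filter_eq_self.2]
    intro q hq
    have : q.2 = c := by simpa using (List.mem_filter.1 hq).2
    simp [this, h]
  · rw [if_neg h, List.filter_eq_nil_iff.2, List.map_nil, List.sum_nil]
    intro q hq
    have : q.2 = c := by simpa using (List.mem_filter.1 hq).2
    simp [this, h]

theorem pvProcess (P cl : List (Int × Int)) (c f0 : Int) (act : PySem.Set Int) (b0 : List Int)
    (hnd : act.Nodup)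
    (hb : (cl.length : Int) < (b0.length : Int))
    (hcov : ∀ a : Int,
      ((a ∈ act ∧ ¬ ∃ jq ∈ PySem.List.enumerate cl, pvHi jq.2 = c ∧ a = jq.1 + 1)
        ∨ (∃ jq ∈ PySem.List.enumerate cl, pvLo jq.2 = c ∧ a = jq.1 + 1))
      ↔ a ∈ pvIdxs cl c) :
    ((PySem.List.sorted2 (pvEvAt P cl c) Prod.fst Prod.snd false).foldl pvAStep (f0, act, b0)).1
        = f0 + pvFree cl (pvPersAt P c)
    ∧ ((PySem.List.sorted2 (pvEvAt P cl c) Prod.fst Prod.snd false).foldl pvAStep (f0, act, b0)).2.1.Nodup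
    ∧ (∀ a : Int, a ∈ ((PySem.List.sorted2 (pvEvAt P cl c) Prod.fst Prod.snd false).foldl pvAStep (f0, act, b0)).2.1
        ↔ a ∈ pvIdxs cl c)
    ∧ ((PySem.List.sorted2 (pvEvAt P cl c) Prod.fst Prod.snd false).foldl pvAStep (f0, act, b0)).2.2.length = b0.length
    ∧ ∀ k : Nat, k < b0.length →
        ((PySem.List.sorted2 (pvEvAt P cl c) Prod.fst Prod.snd false).foldl pvAStep (f0, act, b0)).2.2.getD k 0
          = b0.getD k 0 + pvGain cl (k : Int) (pvPersAt P c) := by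
  set v := pvEvAt P cl c with hv
  set sv := PySem.List.sorted2 v Prod.fst Prod.snd false with hsv
  have hperm : sv.Perm v := PySem.List.sorted2_perm v _ _ false
  have htags : ∀ e ∈ sv, e.1 = -1 ∨ e.1 = 1 ∨ e.1 = 2 :=
    fun e he => pvEvAt_tags P cl c e (hperm.mem_iff.1 he)
  have hgrp := pvGrouped sv (pvSorted2_fst_mono v) htags
  set R := sv.filter (fun e => e.1 == -1) with hR
  set A := sv.filter (fun e => e.1 == 1) with hA
  set Pp := sv.filter (fun e => e.1 == 2) with hPp
  -- process the three phases
  have hfold : sv.foldl pvAStep (f0, act, b0) = Pp.foldl pvAStep (A.foldl pvAStep (R.foldl pvAStep (f0, act, b0))) := by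
    conv_lhs => rw [hgrp]
    rw [List.foldl_append, List.foldl_append]
  set actR := R.foldl (fun s e => PySem.Set.discard s e.2) act with hactR
  have hstep1 : R.foldl pvAStep (f0, act, b0) = (f0, actR, b0) := by
    rw [pvAStep_rem R (f0, act, b0) (fun e he => by simpa using (List.mem_filter.1 he).2)]
  set actRA := A.foldl (fun s e => PySem.Set.add s e.2) actR with hactRA
  have hstep2 : A.foldl pvAStep (f0, actR, b0) = (f0, actRA, b0) := by
    rw [pvAStep_add A (f0, actR, b0) (fun e he => by simpa using (List.mem_filter.1 he).2)]
  -- membership of the active set after removals and additions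
  have hmemR : ∀ a : Int, a ∈ actR ↔ a ∈ act ∧
      ¬ ∃ jq ∈ PySem.List.enumerate cl, pvHi jq.2 = c ∧ a = jq.1 + 1 := by
    intro a
    rw [hactR, pvDiscard_foldl_mem]
    constructor
    · rintro ⟨h1, h2⟩
      refine ⟨h1, ?_⟩
      rintro ⟨jq, hjq, hhic, rfl⟩
      refine h2 (-1, jq.1 + 1) ?_ rfl
      rw [hR, List.mem_filter]
      refine ⟨hperm.mem_iff.2 ?_, by simp⟩
      exact (pvMem_evAt P cl c _).2 (Or.inr ⟨jq, hjq, Or.inr ⟨hhic, rfl⟩⟩)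
    · rintro ⟨h1, h2⟩
      refine ⟨h1, ?_⟩
      intro e he hae
      have hev := hperm.mem_iff.1 (List.mem_of_mem_filter he)
      have htagm : e.1 = -1 := by simpa using (List.mem_filter.1 he).2
      rcases (pvMem_evAt P cl c e).1 hev with ⟨q, _, _, rfl⟩ | ⟨jq, hjq, (⟨_, rfl⟩ | ⟨hc2, rfl⟩)⟩
      · simp at htagm
      · simp at htagm
      · exact h2 ⟨jq, hjq, hc2, by simpa using hae⟩
  have hmemRA : ∀ a : Int, a ∈ actRA ↔ a ∈ pvIdxs cl c := by
    intro a
    rw [hactRA, PySem.Set.mem_foldl_add]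
    rw [← hcov a]
    constructor
    · rintro (h | ⟨e, he, rfl⟩)
      · exact Or.inl (hmemR a |>.1 h)
      · have hev := hperm.mem_iff.1 (List.mem_of_mem_filter he)
        have htagm : e.1 = 1 := by simpa using (List.mem_filter.1 he).2
        rcases (pvMem_evAt P cl c e).1 hev with ⟨q, _, _, rfl⟩ | ⟨jq, hjq, (⟨hc2, rfl⟩ | ⟨_, rfl⟩)⟩
        · simp at htagm
        · exact Or.inr ⟨jq, hjq, hc2, rfl⟩
        · simp at htagm
    · rintro (h | ⟨jq, hjq, hc2, rfl⟩)
      · exact Or.inl ((hmemR a).2 h)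
      · refine Or.inr ⟨(1, jq.1 + 1), ?_, rfl⟩
        rw [hA, List.mem_filter]
        refine ⟨hperm.mem_iff.2 ?_, by simp⟩
        exact (pvMem_evAt P cl c _).2 (Or.inr ⟨jq, hjq, Or.inl ⟨hc2, rfl⟩⟩)
  have hndRA : actRA.Nodup := pvAdd_foldl_nodup A actR (pvDiscard_foldl_nodup R act hnd)
  have hpermIdx : actRA.Perm (pvIdxs cl c) :=
    (List.perm_ext_iff_of_nodup hndRA (pvIdxs_nodup cl c)).2 hmemRA
  have hlenRA : actRA.length = (pvIdxs cl c).length := hpermIdx.length_eq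
  have htagsPp : ∀ e ∈ Pp, e.1 = 2 := fun e he => by simpa using (List.mem_filter.1 he).2
  -- population sum of the tag-2 block equals the population sum of the persons at c
  have hsum : (Pp.map (·.2)).sum = ((pvPersAt P c).map (·.1)).sum := by
    have h1 : Pp.Perm ((pvPersAt P c).map (fun q => ((2:Int), q.1))) := by
      rw [hPp, ← pvEvAt_pers P cl c]
      exact hperm.filter _
    have h2 := (h1.map (·.2)).sum_eq
    rw [h2, List.map_map]
    rfl
  rw [hfold, hstep1, hstep2]
  rcases hcase : (pvIdxs cl c) with _ | ⟨k0, _ | ⟨k1, rest⟩⟩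
  · -- no covering cloud: everyone at c is free
    have hRA : actRA = [] := by
      rw [← List.length_eq_zero_iff, hlenRA, hcase]; rfl
    rw [hRA, pvAStep_pers_empty Pp f0 b0 htagsPp]
    refine ⟨by rw [pvFree_persAt, if_pos hcase, hsum], by simp, by simp [hRA ▸ hmemRA], rfl, ?_⟩
    intro k hk
    rw [pvGain_persAt, if_neg (by rw [hcase]; simp), add_zero]
  · -- exactly one covering cloud k0
    have hbounds := pvIdxs_mem_bounds (cl := cl) (c := c) (k := k0) (by simp [hcase])
    have hRA : actRA = [k0] := by
      have hl1 : actRA.length = 1 := by rw [hlenRA, hcase]; rfl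
      rcases List.length_eq_one_iff.1 hl1 with ⟨a, ha⟩
      have : a ∈ pvIdxs cl c := by rw [← hmemRA]; simp [ha]
      rw [hcase] at this
      simp at this
      rw [ha, this]
    rw [hRA, pvAStep_pers_one Pp f0 k0 b0 htagsPp (by omega) (by omega)]
    refine ⟨by simp [pvFree_persAt, hcase], by simp,
      by intro a; rw [show ((f0, ([k0] : PySem.Set Int), b0.set k0.toNat (b0.getD k0.toNat 0 + (List.map (fun x => x.2) Pp).sum)) : Int × PySem.Set Int × List Int).2.1 = actRA from hRA.symm, hmemRA a, hcase], by simp, ?_⟩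
    intro k hk
    by_cases hkk : (k : Int) = k0
    · have hkn : k = k0.toNat := by omega
      subst hkn
      rw [List.getD_eq_getElem _ 0 (by simpa using hk),
        List.getElem_set_self (by simp; omega), List.getD_eq_getElem _ 0 (by omega)]
      rw [pvGain_persAt, if_pos (by rw [hcase, hkk]), hsum]
    · have hne : k0.toNat ≠ k := by omega
      rw [List.getD_eq_getElem _ 0 (by simpa using hk), List.getElem_set_ne (by omega),
        List.getD_eq_getElem _ 0 hk]
      rw [pvGain_persAt, if_neg (by rw [hcase]; intro hcon; injection hcon with h1 h2; omega), add_zero]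
  · -- two or more covering clouds: nothing changes
    have hRA : 2 ≤ actRA.length := by rw [hlenRA, hcase]; simp
    rw [pvAStep_pers_many Pp (f0, actRA, b0) htagsPp hRA]
    refine ⟨by simp [pvFree_persAt, hcase], hndRA,
      by intro a; rw [← hcase]; exact hmemRA a, rfl, ?_⟩
    intro k hk
    rw [pvGain_persAt, if_neg (by rw [hcase]; simp), add_zero]

theorem pvEnum_inj {cl : List (Int × Int)} {jq jq' : Int × (Int × Int)}
    (h : jq ∈ PySem.List.enumerate cl) (h' : jq' ∈ PySem.List.enumerate cl)
    (he : jq.1 = jq'.1) : jq = jq' := by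
  rcases (PySem.List.mem_enumerate_iff _ _ _).1 h with ⟨k, hk, rfl⟩
  rcases (PySem.List.mem_enumerate_iff _ _ _).1 h' with ⟨k', hk', rfl⟩
  simp only [zero_add] at he
  have : k = k' := by exact_mod_cast he
  subst this
  rfl

theorem pvCoords_pers {P cl : List (Int × Int)} {q : Int × Int} (h : q ∈ P) :
    q.2 ∈ pvCoords P cl := by
  simp only [pvCoords, pvL1, List.mem_map, List.mem_append]
  exact ⟨(q.2, (2, q.1)), Or.inl ⟨q, h, rfl⟩, rfl⟩

theorem pvCoords_lo {P cl : List (Int × Int)} {jq : Int × (Int × Int)}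
    (h : jq ∈ PySem.List.enumerate cl) : pvLo jq.2 ∈ pvCoords P cl := by
  simp only [pvCoords, List.mem_map, List.mem_append]
  exact ⟨(pvLo jq.2, (1, jq.1 + 1)), Or.inr (by
    simp only [pvL2, List.mem_flatMap]
    exact ⟨jq, h, by simp⟩), rfl⟩

theorem pvCoords_hi {P cl : List (Int × Int)} {jq : Int × (Int × Int)}
    (h : jq ∈ PySem.List.enumerate cl) : pvHi jq.2 ∈ pvCoords P cl := by
  simp only [pvCoords, List.mem_map, List.mem_append]
  exact ⟨(pvHi jq.2, (-1, jq.1 + 1)), Or.inr (by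
    simp only [pvL2, List.mem_flatMap]
    exact ⟨jq, h, by simp⟩), rfl⟩

theorem pvSweep (P cl : List (Int × Int)) (hr : ∀ q ∈ cl, 0 ≤ q.2) :
    ∀ (sk : List Int) (f0 : Int) (act : PySem.Set Int) (b0 : List Int),
    sk.Pairwise (· < ·) →
    (∀ k ∈ pvCoords P cl, k ∉ sk → ∀ e ∈ sk, k < e) →
    act.Nodup →
    (∀ a : Int, a ∈ act ↔ ∃ jq ∈ PySem.List.enumerate cl, a = jq.1 + 1 ∧
        pvLo jq.2 ∉ sk ∧ pvHi jq.2 ∈ sk) →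
    (cl.length : Int) < (b0.length : Int) →
    (sk.foldl (fun st c => (PySem.List.sorted2 (pvEvAt P cl c) Prod.fst Prod.snd false).foldl pvAStep st) (f0, act, b0)).1
        = f0 + pvFree cl (sk.flatMap (pvPersAt P))
    ∧ (sk.foldl (fun st c => (PySem.List.sorted2 (pvEvAt P cl c) Prod.fst Prod.snd false).foldl pvAStep st) (f0, act, b0)).2.2.length = b0.length
    ∧ ∀ k : Nat, k < b0.length →
        (sk.foldl (fun st c => (PySem.List.sorted2 (pvEvAt P cl c) Prod.fst Prod.snd false).foldl pvAStep st) (f0, act, b0)).2.2.getD k 0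
          = b0.getD k 0 + pvGain cl (k : Int) (sk.flatMap (pvPersAt P)) := by
  intro sk
  induction sk with
  | nil =>
    intro f0 act b0 _ _ _ _ _
    refine ⟨by simp [pvFree], rfl, ?_⟩
    intro k hk
    simp [pvGain]
  | cons c sk' ih =>
    intro f0 act b0 hpw hbelow hnd hmem hb
    have hpw' : sk'.Pairwise (· < ·) := (List.pairwise_cons.1 hpw).2
    have hclt : ∀ e ∈ sk', c < e := (List.pairwise_cons.1 hpw).1
    have hlh : ∀ jq ∈ PySem.List.enumerate cl, pvLo jq.2 < pvHi jq.2 := by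
      intro jq hjq
      have := hr jq.2 (pvEnum_snd_mem hjq)
      unfold pvLo pvHi; omega
    -- the coverage condition at c
    have hcov : ∀ a : Int,
        ((a ∈ act ∧ ¬ ∃ jq ∈ PySem.List.enumerate cl, pvHi jq.2 = c ∧ a = jq.1 + 1)
          ∨ (∃ jq ∈ PySem.List.enumerate cl, pvLo jq.2 = c ∧ a = jq.1 + 1))
        ↔ a ∈ pvIdxs cl c := by
      intro a
      rw [pvIdxs_mem, hmem]
      constructor
      · rintro (⟨⟨jq, hjq, rfl, hlo, hhi⟩, hrem⟩ | ⟨jq, hjq, hloc, rfl⟩)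
        · refine ⟨jq, hjq, rfl, ?_⟩
          have hhic : pvHi jq.2 ≠ c := fun hhc => hrem ⟨jq, hjq, hhc, rfl⟩
          have hloc : pvLo jq.2 < c :=
            hbelow _ (pvCoords_lo hjq) hlo c List.mem_cons_self
          have hchi : c < pvHi jq.2 := by
            rcases List.mem_cons.1 hhi with heq | hsk'
            · exact absurd heq hhic
            · exact hclt _ hsk'
          simp only [pvCovB, decide_eq_true_eq]
          exact ⟨by omega, hchi⟩
        · refine ⟨jq, hjq, rfl, ?_⟩
          have := hlh jq hjq
          simp only [pvCovB, decide_eq_true_eq]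
          omega
      · rintro ⟨jq, hjq, rfl, hcv⟩
        simp only [pvCovB, decide_eq_true_eq] at hcv
        by_cases hloc : pvLo jq.2 = c
        · exact Or.inr ⟨jq, hjq, hloc, rfl⟩
        · left
          have hlonotsk : pvLo jq.2 ∉ (c :: sk') := by
            intro hin
            rcases List.mem_cons.1 hin with heq | hsk'
            · exact hloc heq
            · have := hclt _ hsk'
              omega
          constructor
          · refine ⟨jq, hjq, rfl, hlonotsk, ?_⟩
            by_cases hhisk : pvHi jq.2 ∈ (c :: sk')
            · exact hhisk
            · have := hbelow _ (pvCoords_hi hjq) hhisk c List.mem_cons_self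
              omega
          · rintro ⟨jq', hjq', hhic, heq⟩
            have : jq' = jq := pvEnum_inj hjq' hjq (by omega)
            subst this
            omega
      -- end hcov
    have hproc := pvProcess P cl c f0 act b0 hnd hb hcov
    simp only [List.foldl_cons]
    set st1 := (PySem.List.sorted2 (pvEvAt P cl c) Prod.fst Prod.snd false).foldl pvAStep (f0, act, b0) with hst1
    obtain ⟨hp1, hp2, hp3, hp4, hp5⟩ := hproc
    -- invariant for the tail
    have hbelow' : ∀ k ∈ pvCoords P cl, k ∉ sk' → ∀ e ∈ sk', k < e := by
      intro k hkco hknot e he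
      by_cases hkc : k = c
      · subst hkc; exact hclt e he
      · exact hbelow k hkco (by simp [hkc, hknot]) e (List.mem_cons_of_mem c he)
    have hmem' : ∀ a : Int, a ∈ st1.2.1 ↔ ∃ jq ∈ PySem.List.enumerate cl, a = jq.1 + 1 ∧
        pvLo jq.2 ∉ sk' ∧ pvHi jq.2 ∈ sk' := by
      intro a
      rw [hp3, pvIdxs_mem]
      constructor
      · rintro ⟨jq, hjq, rfl, hcv⟩
        refine ⟨jq, hjq, rfl, ?_⟩
        simp only [pvCovB, decide_eq_true_eq] at hcv
        constructor
        · intro hsk'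
          have := hclt _ hsk'
          omega
        · by_cases hhisk : pvHi jq.2 ∈ (c :: sk')
          · rcases List.mem_cons.1 hhisk with heq | h
            · omega
            · exact h
          · have := hbelow _ (pvCoords_hi hjq) hhisk c List.mem_cons_self
            omega
      · rintro ⟨jq, hjq, rfl, hlo', hhi'⟩
        refine ⟨jq, hjq, rfl, ?_⟩
        have hchi : c < pvHi jq.2 := hclt _ hhi'
        have hloc : pvLo jq.2 ≤ c := by
          by_contra hgt
          have hlonot : pvLo jq.2 ∉ (c :: sk') := by
            intro hin
            rcases List.mem_cons.1 hin with heq | h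
            · omega
            · exact hlo' h
          have := hbelow _ (pvCoords_lo hjq) hlonot c List.mem_cons_self
          omega
        simp only [pvCovB, decide_eq_true_eq]
        exact ⟨hloc, hchi⟩
    have hihres := ih st1.1 st1.2.1 st1.2.2 hpw' hbelow' hp2 hmem' (by rw [hp4]; exact hb)
    have heta : (st1.1, st1.2.1, st1.2.2) = st1 := rfl
    rw [heta] at hihres
    obtain ⟨hq1, hq2, hq3⟩ := hihres
    refine ⟨?_, ?_, ?_⟩
    · rw [hq1, hp1, List.flatMap_cons, pvFree_append]
      ring
    · rw [hq2, hp4]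
    · intro k hk
      rw [hq3 k (by rw [hp4]; exact hk), hp5 k hk, List.flatMap_cons, pvGain_append]
      ring

theorem pvFlatMap_perm : ∀ (sk : List Int) (P : List (Int × Int)), sk.Nodup →
    (∀ q ∈ P, q.2 ∈ sk) → (sk.flatMap (pvPersAt P)).Perm P := by
  intro sk
  induction sk with
  | nil =>
    intro P _ hall
    have : P = [] := List.eq_nil_iff_forall_not_mem.2 (fun q hq => by simpa using hall q hq)
    simp [this]
  | cons c sk' ih =>
    intro P hnd hall
    rw [List.flatMap_cons]
    have hcns : c ∉ sk' := (List.nodup_cons.1 hnd).1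
    have hrest : sk'.flatMap (pvPersAt P) = sk'.flatMap (pvPersAt (P.filter (fun q => !(q.2 == c)))) := by
      apply List.flatMap_congr
      intro e he
      unfold pvPersAt
      rw [List.filter_filter]
      apply List.filter_congr
      intro q _
      by_cases hq : q.2 = e
      · have : e ≠ c := fun hec => hcns (hec ▸ he)
        simp [hq, this]
      · simp [hq]
    rw [hrest]
    have hih := ih (P.filter (fun q => !(q.2 == c))) (List.nodup_cons.1 hnd).2 ?side
    case side =>
      intro q hq
      have h1 := hall q (List.mem_of_mem_filter hq)
      have h2 : ¬ (q.2 = c) := by simpa using (List.mem_filter.1 hq).2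
      rcases List.mem_cons.1 h1 with heq | h
      · exact absurd heq h2
      · exact h
    exact (hih.append_left (pvPersAt P c)).trans
      (List.filter_append_perm (fun (q : Int × Int) => q.2 == c) P)

theorem pvMain (p x y r : List Int) (hpx : p.length ≤ x.length) (hyr : y.length ≤ r.length)
    (hr0 : ∀ a ∈ r, 0 ≤ a) :
    maximumPeople p x y r = maximumPeople_alt p x y r := by
  simp only [maximumPeople, maximumPeople_alt]
  rw [pvEvents_keys p x y r hpx hyr]
  simp only [pvEvents_getD p x y r hpx hyr]
  set cl := y.zip r with hcl
  set P := p.zip x with hPd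
  set b0 : List Int := List.replicate (y.length + 1) 0 with hb0
  set sk := PySem.List.sorted (PySem.Set.ofList (pvCoords P cl)) (fun k => k) false with hsk
  have hrcl : ∀ q ∈ cl, 0 ≤ q.2 := fun q hq => hr0 q.2 (List.of_mem_zip hq).2
  have hb : (cl.length : Int) < (b0.length : Int) := by
    simp only [hcl, hb0, List.length_zip, List.length_replicate]
    push_cast; omega
  have hpwsk : sk.Pairwise (· < ·) := PySem.List.sorted_ofList_pairwise_lt _
  have hndsk : sk.Nodup := hpwsk.imp (fun h => by omega)
  have hmemsk : ∀ k : Int, k ∈ sk ↔ k ∈ pvCoords P cl := fun k =>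
    (PySem.List.mem_sorted _ _ _ k).trans (PySem.Set.mem_ofList _ k)
  have hmem0 : ∀ a : Int, a ∈ (PySem.Set.empty : PySem.Set Int) ↔
      ∃ jq ∈ PySem.List.enumerate cl, a = jq.1 + 1 ∧
        pvLo jq.2 ∉ sk ∧ pvHi jq.2 ∈ sk := by
    intro a
    constructor
    · intro h; exact absurd h (by simp [PySem.Set.empty])
    · rintro ⟨jq, hjq, _, hlo, _⟩
      exact absurd ((hmemsk _).2 (pvCoords_lo hjq)) hlo
  obtain ⟨hA1, hA2, hA3⟩ := pvSweep P cl hrcl sk 0 PySem.Set.empty b0 hpwsk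
    (fun k hk hnot => absurd ((hmemsk k).2 hk) hnot) (by simp [PySem.Set.empty]) hmem0 hb
  obtain ⟨hB1, hB2, hB3⟩ := pvBStep_foldl cl P 0 b0 hb
  have hperm := pvFlatMap_perm sk P hndsk (fun q hq => (hmemsk q.2).2 (pvCoords_pers hq))
  have hfree : pvFree cl (sk.flatMap (pvPersAt P)) = pvFree cl P := pvFree_perm cl hperm
  have hlist : (sk.foldl (fun st c => (PySem.List.sorted2 (pvEvAt P cl c) Prod.fst Prod.snd false).foldl pvAStep st) (0, PySem.Set.empty, b0)).2.2
      = (P.foldl (pvBStep cl) (0, b0)).2 := by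
    apply List.ext_getElem (by rw [hA2, hB2])
    intro i h1 h2
    rw [← List.getD_eq_getElem _ 0 h1, ← List.getD_eq_getElem _ 0 h2]
    rw [hA3 i (by rw [← hA2]; exact h1), hB3 i (by rw [← hA2]; exact h1)]
    rw [pvGain_perm cl (i : Int) hperm]
  rw [hfree] at hA1
  rw [hA1, hlist]
  have hB1' : (P.foldl (pvBStep cl) (0, b0)).1 = 0 + pvFree cl P := by
    have := hB1; exact congrArg Prod.fst this
  rw [hB1']

-- ===== VERDICT (by name: the statement is the Claim_ definition above) =====
theorem maximumPeople_spec : Claim_equal_maximumPeople := by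
  intro p x y r _ hpre
  unfold Pre_maximumPeople at hpre
  unfold Spec_maximumPeople
  exact pvMain p x y r hpre.1 hpre.2.1 hpre.2.2
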